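-- pv_equiv track=rewrite | github.com/emarberg/stable-grothendieck | tests/test_operators.py | skew_symmetric_undouble
-- ===== SOURCE A (Python) =====
-- def skew_symmetric_undouble(shape):
--     ans = []
--     for a, b in shape:
--         if a < b:
--             while a > len(ans):
--                 ans += [0]
--             ans[a - 1] += 1
--     return tuple(ans)
-- ===== SOURCE B (Python) =====
-- def skew_symmetric_undouble(shape):
--     quals = [a for a, b in shape if a < b]
--     m = max(quals, default=0)
--     return tuple(quals.count(i) for i in range(1, m + 1))
-- ===== Notes on version B (the rewrite author's own statement) =====
-- stated objective: alternative
-- what changed: B keeps no counting container at all: it extracts the qualifying first components, takes their max, and emits bucket i as quals.count(i) with one scan per bucket, instead of A's incremental pad-and-increment update of a growing list.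
-- outside the precondition, e.g. on skew_symmetric_undouble([(1, 2), (0, 5)]): A returns (2,), B returns (1,); on skew_symmetric_undouble([(1, 3), (2, 4), (-1, 0)]): A returns (2, 1), B returns (1, 1)
import Mathlib
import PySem

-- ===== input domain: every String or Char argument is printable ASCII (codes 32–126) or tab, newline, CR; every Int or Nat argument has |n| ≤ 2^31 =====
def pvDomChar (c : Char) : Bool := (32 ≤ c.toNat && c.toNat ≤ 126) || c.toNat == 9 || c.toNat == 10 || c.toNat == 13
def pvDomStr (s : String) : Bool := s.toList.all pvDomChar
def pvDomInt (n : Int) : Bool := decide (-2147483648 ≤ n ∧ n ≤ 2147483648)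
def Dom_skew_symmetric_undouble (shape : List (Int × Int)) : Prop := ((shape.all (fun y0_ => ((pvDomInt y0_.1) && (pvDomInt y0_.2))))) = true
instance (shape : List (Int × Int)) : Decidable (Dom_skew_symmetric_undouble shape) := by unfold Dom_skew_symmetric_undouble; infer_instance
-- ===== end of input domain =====

-- B keeps no counting container: it extracts the qualifying first components, takes their max,
-- and emits bucket i by counting occurrences of i per bucket (objective: alternative).

-- ===== PORT A =====
-- the 'while a > len(ans): ans += [0]' loop
def padA (ans : List Int) (a : Int) : List Int :=
  if h : (ans.length : Int) < a then padA (ans ++ [0]) a else ans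
termination_by (a - ans.length).toNat
decreasing_by simp; omega

def skew_symmetric_undouble (shape : List (Int × Int)) : List Int :=
  shape.foldl (fun ans p =>
    if p.1 < p.2 then
      let ans' := padA ans p.1
      PySem.List.pySetD ans' (p.1 - 1) (PySem.List.pyGetD ans' (p.1 - 1) 0 + 1)
    else ans) []

-- ===== PORT B =====
-- quals = [a for a, b in shape if a < b]
def qualsB (shape : List (Int × Int)) : List Int :=
  (shape.filter (fun p => p.1 < p.2)).map (·.1)

def skew_symmetric_undouble_alt (shape : List (Int × Int)) : List Int :=
  let quals := qualsB shape
  let m : Int := match PySem.List.max? quals (fun x => x) with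
    | none => 0
    | some m => m
  (PySem.List.pyRange 1 (m + 1) 1).map (fun i => (quals.count i : Int))

-- ===== PRECONDITION & SPEC =====
-- Pre_ excludes inputs having a qualifying pair (a < b) with a ≤ 0: there A either raises
-- IndexError or increments through Python's negative-index wraparound, an accident of A's
-- growing-list representation.
def Pre_skew_symmetric_undouble (shape : List (Int × Int)) : Prop :=
  ∀ p ∈ shape, p.1 < p.2 → 1 ≤ p.1
instance (shape : List (Int × Int)) : Decidable (Pre_skew_symmetric_undouble shape) := by
  unfold Pre_skew_symmetric_undouble; infer_instance

def pvWitness_skew_symmetric_undouble : (List (Int × Int)) := [(1, 2), (3, 5), (2, 1)]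

def Spec_skew_symmetric_undouble (shape : List (Int × Int)) (out : List Int) : Prop := out = skew_symmetric_undouble_alt shape
instance (shape : List (Int × Int)) (out : List Int) : Decidable (Spec_skew_symmetric_undouble shape out) := by unfold Spec_skew_symmetric_undouble; infer_instance

-- ===== CLAIM (what is proved, stated in full; the proofs are below) =====
def Claim_equal_skew_symmetric_undouble : Prop := ∀ (shape : List (Int × Int)), Dom_skew_symmetric_undouble shape → Pre_skew_symmetric_undouble shape → Spec_skew_symmetric_undouble shape (skew_symmetric_undouble shape)

-- ===== LEMMAS AND PROOFS =====

def Mx (q : List Int) : Int := q.foldl max 0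

-- the canonical bucket vector both programs produce
def canon (q : List Int) : List Int :=
  (PySem.List.pyRange 1 (Mx q + 1) 1).map (fun i => (q.count i : Int))

lemma padA_eq (ans : List Int) (a : Int) :
    padA ans a = ans ++ List.replicate (a - ans.length).toNat 0 := by
  fun_induction padA ans a with
  | case1 ans h ih =>
      rw [ih]
      have h2 : (a - ans.length).toNat = (a - (ans ++ [0]).length).toNat + 1 := by
        simp; omega
      simp [h2, List.replicate_succ, List.append_assoc]
  | case2 ans h =>
      have h2 : (a - ans.length).toNat = 0 := by omega
      simp [h2]

lemma quals_sound (shape : List (Int × Int))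
    (h : Pre_skew_symmetric_undouble shape) : ∀ x ∈ qualsB shape, 1 ≤ x := by
  intro x hx
  simp [qualsB, List.mem_map, List.mem_filter] at hx
  obtain ⟨b, hmem, hlt⟩ := hx
  exact h (x, b) hmem hlt

lemma Mx_nonneg (q : List Int) : 0 ≤ Mx q := (PySem.List.le_foldl_max q 0).1

lemma le_Mx (q : List Int) : ∀ x ∈ q, x ≤ Mx q := (PySem.List.le_foldl_max q 0).2

lemma length_canon (q : List Int) : (canon q).length = (Mx q).toNat := by
  simp [canon, PySem.List.length_pyRange_one]

lemma getElem_canon (q : List Int) (k : Nat) (hk : k < (Mx q).toNat) :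
    (canon q)[k]'(by simpa [length_canon] using hk) = (q.count ((1 : Int) + k) : Int) := by
  simp only [canon, List.getElem_map, PySem.List.getElem_pyRange_one]

lemma count_eq_zero_of_gt (q : List Int) (i : Int) (hi : Mx q < i) : q.count i = 0 := by
  rw [List.count_eq_zero]
  intro hmem
  exact absurd (le_Mx q i hmem) (by omega)

-- an entry of canon q padded with zeros is still the bucket count
lemma getElem_pad (q : List Int) (z k : Nat) (hk : k < (Mx q).toNat + z) :
    (canon q ++ List.replicate z 0)[k]'(by simp [length_canon]; omega)
      = (q.count ((1 : Int) + k) : Int) := by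
  by_cases hcase : k < (Mx q).toNat
  · rw [List.getElem_append_left (by simpa [length_canon] using hcase)]
    exact getElem_canon q k hcase
  · have hM := Mx_nonneg q
    have hcnt : q.count ((1 : Int) + k) = 0 := count_eq_zero_of_gt q _ (by omega)
    rw [List.getElem_append_right (by simp [length_canon]; omega)]
    simp [hcnt]

-- the body of A's loop sends canon q to canon (q ++ [a]) for a qualifying a
lemma step_canon (q : List Int) (a : Int) (ha : 1 ≤ a) :
    PySem.List.pySetD (padA (canon q) a) (a - 1)
      (PySem.List.pyGetD (padA (canon q) a) (a - 1) 0 + 1) = canon (q ++ [a]) := by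
  have hM := Mx_nonneg q
  have hlc := length_canon q
  rw [padA_eq,
      PySem.List.pyGetD_eq_getElem _ 0 (by omega) (by simp [length_canon]; omega),
      PySem.List.pySetD_of_nonneg _ _ (by omega)]
  have hMx' : Mx (q ++ [a]) = max (Mx q) a := by
    simp [Mx, List.foldl_append]
  have hread : (canon q ++ List.replicate ((a : Int) - (canon q).length).toNat 0)[(a - 1).toNat]'(by simp [length_canon]; omega)
      = (q.count a : Int) := by
    rw [getElem_pad q _ _ (by omega)]
    have hidx : ((1 : Int) + ((a - 1).toNat : Int)) = a := by omega
    rw [hidx]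
  rw [hread]
  apply List.ext_getElem
  · simp [length_canon, hMx']
    omega
  · intro k hk1 hk2
    simp only [List.length_set, List.length_append, length_canon, List.length_replicate] at hk1
    have hk2' : k < (Mx (q ++ [a])).toNat := by simpa [length_canon] using hk2
    rw [List.getElem_set]
    have hcanon : (canon (q ++ [a]))[k]'hk2 =
        ((q.count ((1 : Int) + k) : Int) + if a = (1 : Int) + k then 1 else 0) := by
      rw [getElem_canon (q ++ [a]) k hk2']
      have hsingle : List.count ((1 : Int) + k) [a] = if a = (1 : Int) + k then 1 else 0 := by
        by_cases hEq : a = (1 : Int) + k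
        · rw [if_pos hEq, hEq, List.count_singleton]
          simp
        · have hEq' : ¬((1 : Int) + k = a) := fun h' => hEq h'.symm
          rw [if_neg hEq, List.count_eq_zero]
          simpa using hEq'
      rw [List.count_append, hsingle]
      push_cast
      ring
    rw [hcanon]
    by_cases hke : (a - 1).toNat = k
    · have hak : a = (1 : Int) + k := by omega
      rw [if_pos hke, hak, if_pos rfl]
    · have hak : ¬ (a = (1 : Int) + k) := by omega
      rw [if_neg hke, if_neg hak, add_zero]
      exact getElem_pad q _ k (by omega)

-- A's fold over shape is a fold of its loop body over the qualifying components
lemma A_foldl (shape : List (Int × Int)) (ans : List Int) :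
    shape.foldl (fun ans p =>
      if p.1 < p.2 then
        let ans' := padA ans p.1
        PySem.List.pySetD ans' (p.1 - 1) (PySem.List.pyGetD ans' (p.1 - 1) 0 + 1)
      else ans) ans
    = (qualsB shape).foldl (fun ans a =>
        PySem.List.pySetD (padA ans a) (a - 1)
          (PySem.List.pyGetD (padA ans a) (a - 1) 0 + 1)) ans := by
  induction shape generalizing ans with
  | nil => simp [qualsB]
  | cons p t ih =>
      by_cases h : p.1 < p.2 <;> simp [qualsB, h, ih]

lemma foldl_canon (q : List Int) (hq : ∀ x ∈ q, 1 ≤ x) :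
    q.foldl (fun ans a =>
      PySem.List.pySetD (padA ans a) (a - 1)
        (PySem.List.pyGetD (padA ans a) (a - 1) 0 + 1)) [] = canon q := by
  induction q using List.reverseRecOn with
  | nil => decide
  | append_singleton t a ih =>
      rw [List.foldl_append]
      have ht : ∀ x ∈ t, 1 ≤ x := fun x hx => hq x (by simp [hx])
      rw [ih ht]
      simp only [List.foldl_cons, List.foldl_nil]
      exact step_canon t a (hq a (by simp))

-- B's `max(quals, default=0)` equals the padded running max when all quals are ≥ 1
lemma B_max_eq_Mx (q : List Int) (hq : ∀ x ∈ q, 1 ≤ x) :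
    (match PySem.List.max? q (fun x => x) with | none => 0 | some m => m) = Mx q := by
  cases q with
  | nil => simp [PySem.List.max?, Mx]
  | cons x t =>
      rw [PySem.List.max?_id_cons]
      have hx : 1 ≤ x := hq x (by simp)
      have : max 0 x = x := by omega
      simp only [Mx, List.foldl_cons, this]

lemma B_eq_canon (shape : List (Int × Int)) (h : Pre_skew_symmetric_undouble shape) :
    skew_symmetric_undouble_alt shape = canon (qualsB shape) := by
  simp only [skew_symmetric_undouble_alt, canon, B_max_eq_Mx _ (quals_sound shape h)]

-- ===== VERDICT (by name: the statement is the Claim_ definition above) =====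
theorem skew_symmetric_undouble_spec : Claim_equal_skew_symmetric_undouble := by
  intro shape _ hpre
  unfold Spec_skew_symmetric_undouble
  rw [B_eq_canon shape hpre]
  unfold skew_symmetric_undouble
  rw [A_foldl, foldl_canon _ (quals_sound shape hpre)]
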